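-- pv_equiv track=rewrite | github.com/AkashMaurya1430/GoogleHashCodePractice-2020 | Solution_v5.py | greedySolution
-- ===== SOURCE A (Python) =====
-- def greedySolution(max_required_slice, pizza_types):
--     pizza_types_orderd_dsc = []
--     ordered_till = 0
--     for index in range(len(pizza_types)-1, -1, -1):
--         if (ordered_till + pizza_types[index] <= max_required_slice):
--             ordered_till = ordered_till + pizza_types[index]
--             pizza_types_orderd_dsc = [index] + pizza_types_orderd_dsc
--         else:
--             break
--     return ordered_till, pizza_types_orderd_dsc
-- ===== SOURCE B (Python) =====
-- def greedySolution(max_required_slice, pizza_types):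
--     # Staged pipeline instead of A's single backward loop with break+prepends:
--     # Stage 1: accumulate — running sums of the reversed list (suffix sums), computed in full.
--     sums = []
--     acc = 0
--     for v in reversed(pizza_types):
--         acc += v
--         sums.append(acc)
--     # Stage 2: takewhile — length of the longest prefix of sums staying within the limit.
--     k = 0
--     while k < len(sums) and sums[k] <= max_required_slice:
--         k += 1
--     # Stage 3: read the answer off: last kept sum, and the indices as one range().
--     total = sums[k - 1] if k else 0
--     return total, list(range(len(pizza_types) - k, len(pizza_types)))
-- ===== Notes on version B (the rewrite author's own statement) =====
-- stated objective: alternative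
-- what changed: B replaces A's single backward loop (running sum + early break + repeated [index]+list prepends) by a staged accumulate/takewhile/range pipeline: it first builds the full list of running sums of the reversed list, then takes the longest prefix of those sums within the limit, and finally reads off the total as the last kept sum and emits the index list once with range().
import Mathlib
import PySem

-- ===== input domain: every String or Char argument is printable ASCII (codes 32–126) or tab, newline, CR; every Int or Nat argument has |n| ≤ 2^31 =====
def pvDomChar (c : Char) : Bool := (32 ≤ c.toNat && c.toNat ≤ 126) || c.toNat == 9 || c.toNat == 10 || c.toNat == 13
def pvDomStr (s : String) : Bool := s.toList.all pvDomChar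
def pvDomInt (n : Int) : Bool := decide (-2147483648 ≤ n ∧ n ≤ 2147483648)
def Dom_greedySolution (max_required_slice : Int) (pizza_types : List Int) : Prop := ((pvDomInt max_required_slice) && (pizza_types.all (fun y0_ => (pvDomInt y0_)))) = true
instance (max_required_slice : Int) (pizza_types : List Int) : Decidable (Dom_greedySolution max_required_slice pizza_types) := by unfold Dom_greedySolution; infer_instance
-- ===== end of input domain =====

-- B replaces A's single backward loop (break + repeated [index]+list prepends) by a staged
-- accumulate / takewhile / range pipeline; objective: alternative decomposition.

-- ===== PORT A =====
-- the for-loop over range(len-1, -1, -1) with its early break, running sum and list prepend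
def greedyLoopA (max_required_slice : Int) (pizza_types : List Int) :
    List Int → Int → List Int → Int × List Int
  | [], ordered_till, res => (ordered_till, res)
  | i :: rest, ordered_till, res =>
    -- pizza_types[index]: index is always in range here, so the default is never used
    if ordered_till + PySem.List.pyGetD pizza_types i 0 ≤ max_required_slice then
      greedyLoopA max_required_slice pizza_types rest
        (ordered_till + PySem.List.pyGetD pizza_types i 0) ([i] ++ res)
    else (ordered_till, res)

def greedySolution (max_required_slice : Int) (pizza_types : List Int) : Int × List Int :=
  greedyLoopA max_required_slice pizza_types
    (PySem.List.pyRange (PySem.List.len pizza_types - 1) (-1) (-1)) 0 []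

-- ===== PORT B =====
-- stage 1: the accumulate loop — running sums of the reversed list, appended one by one
def scanStage (ys : List Int) : Int × List Int :=
  ys.foldl (fun st v => (st.1 + v, st.2 ++ [st.1 + v])) (0, [])

-- stage 2: the takewhile loop — count entries of sums while they stay ≤ max
def takeCount (max_required_slice : Int) : List Int → Nat
  | [] => 0
  | s :: rest => if s ≤ max_required_slice then takeCount max_required_slice rest + 1 else 0

def greedySolution_alt (max_required_slice : Int) (pizza_types : List Int) : Int × List Int :=
  let sums := (scanStage pizza_types.reverse).2
  let k := takeCount max_required_slice sums
  -- sums[k-1] if k else 0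
  let total := if k ≠ 0 then PySem.List.pyGetD sums ((k : Int) - 1) 0 else 0
  (total, PySem.List.pyRange (PySem.List.len pizza_types - (k : Int)) (PySem.List.len pizza_types) 1)

-- ===== PRECONDITION & SPEC =====
def Spec_greedySolution (max_required_slice : Int) (pizza_types : List Int) (out : Int × List Int) : Prop := out = greedySolution_alt max_required_slice pizza_types
instance (max_required_slice : Int) (pizza_types : List Int) (out : Int × List Int) : Decidable (Spec_greedySolution max_required_slice pizza_types out) := by unfold Spec_greedySolution; infer_instance

-- ===== CLAIM =====
def Claim_equal_greedySolution : Prop := ∀ (max_required_slice : Int) (pizza_types : List Int), Dom_greedySolution max_required_slice pizza_types → Spec_greedySolution max_required_slice pizza_types (greedySolution max_required_slice pizza_types)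

-- ===== LEMMAS AND PROOFS =====

-- canonical form shared by both ports: break-style loop returning (sum, count)
def greedyLoopB (m : Int) : List Int → Int → Nat → Int × Nat
  | [], total, kept => (total, kept)
  | v :: rest, total, kept =>
    if total + v > m then (total, kept)
    else greedyLoopB m rest (total + v) (kept + 1)

-- ascending integer range [a, a+1, …, a+k-1], the shape of A's accumulated index list
def ascInts (a : Int) (k : Nat) : List Int := (List.range k).map (fun j : Nat => a + (j : Int))

-- running partial sums starting from t, the value of B's stage-1 loop
def scanSums : List Int → Int → List Int
  | [], _ => []
  | v :: r, t => (t + v) :: scanSums r (t + v)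

theorem ascInts_succ (a : Int) (k : Nat) : ascInts a (k + 1) = ascInts a k ++ [a + (k : Int)] := by
  simp [ascInts, List.range_succ]

theorem greedyLoopB_shift (m : Int) (ys : List Int) (t : Int) (a : Nat) :
    greedyLoopB m ys t a = ((greedyLoopB m ys t 0).1, a + (greedyLoopB m ys t 0).2) := by
  induction ys generalizing t a with
  | nil => simp [greedyLoopB]
  | cons v rest ih =>
    simp only [greedyLoopB, Nat.zero_add]
    split
    · simp
    · rw [ih (t + v) (a + 1), ih (t + v) 1]
      exact Prod.ext rfl (by dsimp only; omega)

theorem greedyLoopB_count_le (m : Int) (ys : List Int) (t : Int) :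
    (greedyLoopB m ys t 0).2 ≤ ys.length := by
  induction ys generalizing t with
  | nil => simp [greedyLoopB]
  | cons v rest ih =>
    simp only [greedyLoopB, Nat.zero_add]
    split
    · simp
    · rw [greedyLoopB_shift]
      have := ih (t + v)
      simp
      omega

-- A's loop over indices t-1 … 0 equals the canonical loop over (take t).reverse,
-- with the result index list written as the ascending range [t-k, …, t-1]
theorem loopA_eq_loopB (m : Int) (xs : List Int) :
    ∀ (t : Nat), t ≤ xs.length → ∀ (ot : Int) (res : List Int),
      greedyLoopA m xs (PySem.List.pyRange ((t : Int) - 1) (-1) (-1)) ot res =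
        ((greedyLoopB m (xs.take t).reverse ot 0).1,
          ascInts ((t : Int) - (greedyLoopB m (xs.take t).reverse ot 0).2)
            (greedyLoopB m (xs.take t).reverse ot 0).2 ++ res) := by
  intro t
  induction t with
  | zero =>
    intro _ ot res
    rw [PySem.List.pyRange_neg_one_eq_nil (by omega)]
    simp [greedyLoopA, greedyLoopB, ascInts]
  | succ t ih =>
    intro ht ot res
    have htlt : t < xs.length := by omega
    rw [PySem.List.pyRange_neg_one_cons (by push_cast; omega)]
    rw [show (((t + 1 : Nat) : Int)) - 1 = ((t : Nat) : Int) from by push_cast; omega]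
    have hidx : PySem.List.pyGetD xs ((t : Nat) : Int) 0 = xs[t] := by
      rw [PySem.List.pyGetD_natCast]
      simp [List.getD, htlt]
    have htake : (xs.take (t + 1)).reverse = xs[t] :: (xs.take t).reverse := by
      rw [List.take_add_one]
      simp [htlt]
    simp only [greedyLoopA, hidx, htake, greedyLoopB, Nat.zero_add]
    by_cases hc : ot + xs[t] ≤ m
    · rw [if_pos hc, if_neg (by omega)]
      rw [ih (by omega) (ot + xs[t]) ([((t : Nat) : Int)] ++ res)]
      rw [greedyLoopB_shift m ((xs.take t).reverse) (ot + xs[t]) 1]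
      set k := (greedyLoopB m (xs.take t).reverse (ot + xs[t]) 0).2 with hk
      have hkle : k ≤ t := by
        have := greedyLoopB_count_le m ((xs.take t).reverse) (ot + xs[t])
        simp at this
        omega
      refine Prod.ext rfl ?_
      dsimp only
      rw [show (1 + k) = k + 1 from by omega, ascInts_succ]
      rw [show (((t + 1 : Nat) : Int)) - (((k + 1 : Nat)) : Int) = ((t : Nat) : Int) - ((k : Nat) : Int) from by push_cast; omega]
      rw [show ((t : Nat) : Int) - ((k : Nat) : Int) + ((k : Nat) : Int) = ((t : Nat) : Int) from by omega]
      simp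
    · rw [if_neg hc, if_pos (by omega)]
      simp [ascInts]

-- B's stage-1 fold builds exactly the partial-sum list
theorem scanStage_eq (ys : List Int) :
    ∀ (t : Int) (out : List Int),
      ys.foldl (fun st v => (st.1 + v, st.2 ++ [st.1 + v])) (t, out) =
        (t + ys.sum, out ++ scanSums ys t) := by
  induction ys with
  | nil => intro t out; simp [scanSums]
  | cons v rest ih =>
    intro t out
    simp only [List.foldl, List.sum_cons, scanSums]
    rw [ih (t + v) (out ++ [t + v])]
    refine Prod.ext (by dsimp only; ring) (by simp)

theorem scanSums_length (ys : List Int) : ∀ t, (scanSums ys t).length = ys.length := by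
  induction ys with
  | nil => intro t; simp [scanSums]
  | cons v rest ih => intro t; simp [scanSums, ih]

theorem takeCount_le (m : Int) (l : List Int) : takeCount m l ≤ l.length := by
  induction l with
  | nil => simp [takeCount]
  | cons s rest ih =>
    simp only [takeCount]
    split
    · simp; omega
    · simp

-- stages 1+2 of B compute the same (sum, count) as the canonical break loop
theorem loopB_eq_stages (m : Int) (ys : List Int) : ∀ (t : Int),
    greedyLoopB m ys t 0 =
      (if takeCount m (scanSums ys t) ≠ 0 then
          (scanSums ys t).getD (takeCount m (scanSums ys t) - 1) 0
        else t,
        takeCount m (scanSums ys t)) := by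
  induction ys with
  | nil => intro t; simp [greedyLoopB, scanSums, takeCount]
  | cons v rest ih =>
    intro t
    simp only [greedyLoopB, scanSums, takeCount, Nat.zero_add]
    by_cases hle : t + v ≤ m
    · rw [if_neg (by omega : ¬ t + v > m), if_pos hle]
      rw [greedyLoopB_shift, ih (t + v)]
      refine Prod.ext ?_ (by dsimp only; omega)
      dsimp only
      rw [if_pos (Nat.succ_ne_zero (takeCount m (scanSums rest (t + v))))]
      cases htc : takeCount m (scanSums rest (t + v)) with
      | zero => simp [List.getD]
      | succ k => simp [List.getD]
    · rw [if_pos (by omega : t + v > m), if_neg hle]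
      simp

-- B equals the canonical (sum, asc-range) form
theorem alt_eq_canon (m : Int) (xs : List Int) :
    greedySolution_alt m xs =
      ((greedyLoopB m xs.reverse 0 0).1,
        ascInts ((xs.length : Int) - ((greedyLoopB m xs.reverse 0 0).2 : Int))
          (greedyLoopB m xs.reverse 0 0).2) := by
  unfold greedySolution_alt scanStage
  rw [scanStage_eq xs.reverse 0 []]
  dsimp only [List.nil_append]
  rw [loopB_eq_stages m xs.reverse 0]
  dsimp only
  set sums := scanSums xs.reverse 0 with hsums
  set k := takeCount m sums with hk
  have hklen : k ≤ xs.length := by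
    have h1 := takeCount_le m sums
    have h2 := scanSums_length xs.reverse 0
    rw [← hsums] at h2
    simp [h2] at h1
    omega
  have hlen : PySem.List.len xs = ((xs.length : Nat) : Int) := by simp [PySem.List.len_eq]
  refine Prod.ext ?_ ?_
  · dsimp only
    by_cases h0 : k = 0
    · simp [h0]
    · rw [if_pos h0, if_pos h0,
        show ((k : Int) - 1) = (((k - 1 : Nat)) : Int) from by omega,
        PySem.List.pyGetD_natCast]
  · dsimp only
    rw [hlen, PySem.List.pyRange_one]
    rw [show ((xs.length : Int) - ((xs.length : Int) - (k : Int))).toNat = k from by omega]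
    simp [ascInts]

-- ===== VERDICT =====
theorem greedySolution_spec : Claim_equal_greedySolution := by
  intro m xs _
  show greedySolution m xs = greedySolution_alt m xs
  rw [alt_eq_canon]
  unfold greedySolution
  have hlen : PySem.List.len xs = ((xs.length : Nat) : Int) := by simp [PySem.List.len_eq]
  rw [hlen, loopA_eq_loopB m xs xs.length (le_refl _) 0 []]
  rw [List.take_length, List.append_nil]
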